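-- pv_equiv track=rewrite | github.com/Wajktor13/ads-lab | asd/colloquia/2019-2020/col1/zad1.py | transform
-- ===== SOURCE A (Python) =====
-- def transform(num):
--     n = num
--     digits = [0] * 10
--     while n > 0:
--         digits[n % 10] += 1
--         n //= 10
--
--     single = multi = 0
--     for counter in digits:
--         if counter == 1:
--             single += 1
--         elif counter > 1:
--             multi += 1
--
--     return num, single, multi
-- ===== SOURCE B (Python) =====
-- def transform(num):
--     # Extract decimal digits (empty for num <= 0), then classify each distinct
--     # digit by how often it occurs in the digit list.
--     ds = []
--     n = num
--     while n > 0: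
--         ds.append(n % 10)
--         n //= 10
--     distinct = set(ds)
--     single = sum(1 for d in distinct if ds.count(d) == 1)
--     return num, single, len(distinct) - single
-- ===== Notes on version B (the rewrite author's own statement) =====
-- stated objective: alternative
-- what changed: Instead of maintaining a mutated fixed-size per-digit counter array and classifying its entries, B collects the digit list, and counts occurrences of each distinct digit directly, deriving multi as len(set(ds)) - single.
import Mathlib
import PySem

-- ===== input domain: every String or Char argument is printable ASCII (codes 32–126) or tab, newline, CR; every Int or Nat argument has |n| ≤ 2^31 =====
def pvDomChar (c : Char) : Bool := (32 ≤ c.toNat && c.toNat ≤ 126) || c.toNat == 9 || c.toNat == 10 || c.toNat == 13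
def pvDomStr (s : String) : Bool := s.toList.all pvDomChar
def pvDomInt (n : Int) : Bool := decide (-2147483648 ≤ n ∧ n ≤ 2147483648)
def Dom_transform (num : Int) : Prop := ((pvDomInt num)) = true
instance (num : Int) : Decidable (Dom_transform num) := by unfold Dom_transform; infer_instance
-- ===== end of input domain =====

-- B replaces A's mutated fixed-size histogram with a digit list whose distinct digits are
-- classified by their occurrence count (multi = len(set(ds)) - single); objective: alternative.

-- ===== PORT A =====
-- while n > 0: digits[n % 10] += 1; n //= 10
-- digits[n % 10] += 1 is ported with List.set/getD at index (mod n 10).toNat; exact since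
-- 0 ≤ n % 10 < 10 = len(digits) (positive divisor), so no negative indexing/IndexError arises.
def transformLoopA (n : Int) (digits : List Int) : List Int :=
  if 0 < n then
    transformLoopA (PySem.Int.floordiv n 10)
      (digits.set (PySem.Int.mod n 10).toNat (digits.getD (PySem.Int.mod n 10).toNat 0 + 1))
  else digits
termination_by n.toNat
decreasing_by
  rename_i h
  rw [PySem.Int.floordiv_eq_ediv_of_pos (by norm_num : (0:Int) < 10)]
  omega

-- for counter in digits: if counter == 1: single += 1 elif counter > 1: multi += 1
def classifyA (digits : List Int) : Int × Int :=
  digits.foldl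
    (fun sm counter =>
      if counter == 1 then (sm.1 + 1, sm.2)
      else if 1 < counter then (sm.1, sm.2 + 1)
      else sm)
    (0, 0)

def transform (num : Int) : Int × Int × Int :=
  let digits := transformLoopA num (List.replicate 10 0)
  let sm := classifyA digits
  (num, sm.1, sm.2)

-- ===== PORT B =====
-- while n > 0: ds.append(n % 10); n //= 10
def transformLoopB (n : Int) (ds : List Int) : List Int :=
  if 0 < n then
    transformLoopB (PySem.Int.floordiv n 10) (ds ++ [PySem.Int.mod n 10])
  else ds
termination_by n.toNat
decreasing_by
  rename_i h
  rw [PySem.Int.floordiv_eq_ediv_of_pos (by norm_num : (0:Int) < 10)]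
  omega

-- distinct = set(ds); single = sum(1 for d in distinct if ds.count(d) == 1)
def transform_alt (num : Int) : Int × Int × Int :=
  let ds := transformLoopB num []
  let distinct := PySem.Set.ofList ds
  let single := distinct.foldl (fun acc d => if ds.count d == 1 then acc + 1 else acc) (0 : Int)
  (num, single, PySem.Set.len distinct - single)

-- ===== PRECONDITION & SPEC =====
def Spec_transform (num : Int) (out : Int × Int × Int) : Prop := out = transform_alt num
instance (num : Int) (out : Int × Int × Int) : Decidable (Spec_transform num out) := by unfold Spec_transform; infer_instance

-- ===== CLAIM (what is proved, stated in full; the proofs are below) =====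
def Claim_equal_transform : Prop := ∀ (num : Int), Dom_transform num → Spec_transform num (transform num)

-- ===== LEMMAS AND PROOFS =====

-- The digit list of n, most recursive form (proof-side reference object).
def pureDigits (n : Int) : List Int :=
  if 0 < n then PySem.Int.mod n 10 :: pureDigits (PySem.Int.floordiv n 10) else []
termination_by n.toNat
decreasing_by
  rename_i h
  rw [PySem.Int.floordiv_eq_ediv_of_pos (by norm_num : (0:Int) < 10)]
  omega

lemma loopB_eq (n : Int) (ds : List Int) : transformLoopB n ds = ds ++ pureDigits n := by
  fun_induction transformLoopB n ds with
  | case1 n ds h ih =>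
    rw [ih]
    conv_rhs => rw [pureDigits, if_pos h]
    rw [List.append_assoc]
    rfl
  | case2 n ds h =>
    rw [pureDigits, if_neg h, List.append_nil]

lemma pureDigits_mem (n : Int) : ∀ d ∈ pureDigits n, 0 ≤ d ∧ d < 10 := by
  fun_induction pureDigits n with
  | case1 n h ih =>
    intro d hd
    rcases List.mem_cons.mp hd with h1 | h1
    · subst h1
      exact ⟨PySem.Int.mod_nonneg n (by norm_num), PySem.Int.mod_lt n (by norm_num)⟩
    · exact ih d h1
  | case2 n h => intro d hd; simp at hd

lemma loopA_eq (n : Int) (digits : List Int) (h : digits.length = 10) :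
    transformLoopA n digits =
      (List.range 10).map (fun d => digits.getD d 0 + ((pureDigits n).count (d : Int) : Int)) := by
  fun_induction transformLoopA n digits with
  | case1 n digits hn ih =>
    have h0 := PySem.Int.mod_nonneg n (by norm_num : (0:Int) < 10)
    have h2 := PySem.Int.mod_lt n (by norm_num : (0:Int) < 10)
    have hk : (PySem.Int.mod n 10).toNat < 10 := by omega
    rw [ih (by simpa using h)]
    conv_rhs => rw [pureDigits, if_pos hn]
    apply List.map_congr_left
    intro d hd
    have hd10 : d < 10 := List.mem_range.mp hd
    rw [List.count_cons]
    by_cases hdk : d = (PySem.Int.mod n 10).toNat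
    · have hset : (digits.set (PySem.Int.mod n 10).toNat
          (digits.getD (PySem.Int.mod n 10).toNat 0 + 1)).getD d 0 = digits.getD d 0 + 1 := by
        subst hdk
        have hmod : PySem.Int.mod n 10 = n % 10 :=
          PySem.Int.mod_eq_emod_of_pos (by norm_num : (0:Int) < 10)
        simp [List.getD, List.getElem?_set, h]
        rw [if_pos (by omega)]
        simp
      have hbeq : (PySem.Int.mod n 10 == (d : Int)) = true := by
        simp only [beq_iff_eq]
        omega
      rw [hset, hbeq, if_pos rfl]
      push_cast
      ring
    · have hset : (digits.set (PySem.Int.mod n 10).toNat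
          (digits.getD (PySem.Int.mod n 10).toNat 0 + 1)).getD d 0 = digits.getD d 0 := by
        have hmod : PySem.Int.mod n 10 = n % 10 :=
          PySem.Int.mod_eq_emod_of_pos (by norm_num : (0:Int) < 10)
        have hdk' : ¬((n % 10).toNat = d) := by
          rw [hmod] at hdk
          omega
        simp [List.getD, List.getElem?_set]
        rw [if_neg (by omega)]
      have hbeq : (PySem.Int.mod n 10 == (d : Int)) = false := by
        simp only [beq_eq_false_iff_ne, ne_eq]
        omega
      rw [hset, hbeq, if_neg (by simp)]
      push_cast
      ring
  | case2 n digits hn =>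
    rw [pureDigits, if_neg hn]
    apply List.ext_getElem
    · simp [h]
    · intro i hi hi2
      simp at hi2
      simp [List.getD, List.getElem?_eq_getElem (by omega : i < digits.length)]

lemma classifyA_fold (l : List Int) (a b : Int) :
    l.foldl (fun sm counter =>
        if counter == 1 then (sm.1 + 1, sm.2)
        else if 1 < counter then (sm.1, sm.2 + 1)
        else sm) (a, b) =
      (a + (l.countP (fun c => c == 1) : Int), b + (l.countP (fun c => decide (1 < c)) : Int)) := by
  induction l generalizing a b with
  | nil => simp
  | cons c l ih =>
    simp only [List.foldl_cons, List.countP_cons]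
    by_cases h1 : c = 1
    · subst h1
      rw [if_pos (by simp), ih]
      simp only [Prod.mk.injEq]
      constructor <;> (simp only [beq_self_eq_true, if_true, show decide ((1:Int) < 1) = false from by simp]; push_cast; ring)
    · rw [if_neg (by simp [h1])]
      by_cases h2 : 1 < c
      · rw [if_pos h2, ih]
        simp only [Prod.mk.injEq]
        constructor <;> (simp only [show (c == 1) = false from by simp [h1], h2, decide_true, if_true]; push_cast; ring)
      · rw [if_neg h2, ih]
        simp [h1, h2]

-- pointwise three-way split of a count
lemma countP_split (l : List Nat) (c : Nat → Nat) :
    l.countP (fun a => decide (0 < c a)) =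
      l.countP (fun a => c a == 1) + l.countP (fun a => decide (1 < c a)) := by
  induction l with
  | nil => simp
  | cons x l ih =>
    simp only [List.countP_cons]
    rcases Nat.lt_trichotomy (c x) 1 with h | h | h
    · have h0 : c x = 0 := by omega
      simp [h0, ih]
    · simp [h, ih]
      omega
    · have h1 : (c x == 1) = false := by simp; omega
      simp [h1, h, Nat.lt_of_succ_lt h, ih]
      omega

-- countP over the distinct digits of ds equals countP over range 10 of "p ∧ digit present"
lemma countP_ofList_eq (ds : List Int) (hmem : ∀ d ∈ ds, 0 ≤ d ∧ d < 10) (p : Int → Bool) :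
    (PySem.Set.ofList ds).countP p =
      (List.range 10).countP (fun k : Nat => p (k : Int) && decide ((k : Int) ∈ ds)) := by
  have hinj : Function.Injective (fun k : Nat => (k : Int)) := Nat.cast_injective
  have hTnodup : (((List.range 10).map (fun k : Nat => (k : Int))).filter
      (fun d => decide (d ∈ ds))).Nodup :=
    List.Nodup.filter _ (List.Nodup.map hinj List.nodup_range)
  have hperm : (PySem.Set.ofList ds).Perm
      (((List.range 10).map (fun k : Nat => (k : Int))).filter (fun d => decide (d ∈ ds))) := by
    rw [List.perm_ext_iff_of_nodup (PySem.Set.nodup_ofList ds) hTnodup]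
    intro a
    rw [PySem.Set.mem_ofList]
    simp only [List.mem_filter, List.mem_map, List.mem_range, decide_eq_true_eq]
    constructor
    · intro ha
      have hb := hmem a ha
      exact ⟨⟨a.toNat, by omega, by omega⟩, ha⟩
    · rintro ⟨_, ha⟩
      exact ha
  rw [hperm.countP_eq, List.countP_filter, List.countP_map]
  rfl

lemma transform_eq_alt (num : Int) : transform num = transform_alt num := by
  have hmem := pureDigits_mem num
  have hA : transform num = (num,
      (((List.range 10).countP (fun k : Nat => (pureDigits num).count (k : Int) == 1)) : Int),
      (((List.range 10).countP (fun k : Nat => decide (1 < (pureDigits num).count (k : Int)))) : Int)) := by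
    simp only [transform, classifyA]
    rw [loopA_eq num _ (by simp), classifyA_fold]
    simp only [List.countP_map, zero_add]
    refine Prod.ext rfl (Prod.ext ?_ ?_)
    · simp only
      congr 1
      apply List.countP_congr
      intro k hk
      have hk10 : k < 10 := List.mem_range.mp hk
      simp only [Function.comp, List.getD_replicate (0:Int) hk10, zero_add, beq_iff_eq,
        Nat.cast_eq_one]
    · simp only
      congr 1
      apply List.countP_congr
      intro k hk
      have hk10 : k < 10 := List.mem_range.mp hk
      simp only [Function.comp, List.getD_replicate (0:Int) hk10, zero_add,
        decide_eq_true_eq, Nat.one_lt_cast]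
  have hB : transform_alt num = (num,
      (((List.range 10).countP (fun k : Nat => (pureDigits num).count (k : Int) == 1)) : Int),
      (((List.range 10).countP (fun k : Nat => decide (0 < (pureDigits num).count (k : Int)))) : Int) -
        (((List.range 10).countP (fun k : Nat => (pureDigits num).count (k : Int) == 1)) : Int)) := by
    simp only [transform_alt, loopB_eq, List.nil_append]
    rw [PySem.List.foldl_if_add_one (fun d => (pureDigits num).count d == 1)
      (PySem.Set.ofList (pureDigits num)) 0]
    rw [countP_ofList_eq (pureDigits num) hmem (fun d => (pureDigits num).count d == 1)]
    have hsingle : ((List.range 10).countP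
        (fun k : Nat => ((pureDigits num).count (k : Int) == 1) && decide ((k : Int) ∈ pureDigits num))) =
        ((List.range 10).countP (fun k : Nat => (pureDigits num).count (k : Int) == 1)) := by
      apply List.countP_congr
      intro k _
      constructor
      · intro h
        exact ((Bool.and_eq_true _ _).mp h).1
      · intro h
        have hc : (pureDigits num).count (k : Int) = 1 := by simpa using h
        have hmemk : (k : Int) ∈ pureDigits num := List.count_pos_iff.mp (by omega)
        simp [hc, hmemk]
    have hlen : PySem.Set.len (PySem.Set.ofList (pureDigits num)) =
        (((List.range 10).countP (fun k : Nat => decide (0 < (pureDigits num).count (k : Int)))) : Int) := by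
      have h1 := countP_ofList_eq (pureDigits num) hmem (fun _ => true)
      simp only [Bool.true_and, List.countP_true] at h1
      have h2 : PySem.Set.len (PySem.Set.ofList (pureDigits num)) =
          ((PySem.Set.ofList (pureDigits num)).length : Int) := by
        simp [PySem.Set.len]
      rw [h2, h1]
      congr 1
      apply List.countP_congr
      intro k _
      simp [List.count_pos_iff]
    rw [hsingle, hlen]
    simp
  rw [hA, hB]
  have hsplit := countP_split (List.range 10) (fun k : Nat => (pureDigits num).count (k : Int))
  refine Prod.ext rfl (Prod.ext rfl ?_)
  simp only at hsplit ⊢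
  omega

-- ===== VERDICT (by name: the statement is the Claim_ definition above) =====
theorem transform_spec : Claim_equal_transform := by
  intro num _
  unfold Spec_transform
  exact transform_eq_alt num
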